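-- pv_equiv track=rewrite | github.com/jeho0131/olympiadnew | fsjoi3.py | ereaserl
-- ===== SOURCE A (Python) =====
-- sjoi = ['S','J','O','I']
--
-- def ereaserl(l):
--     ld = []
--     for e in range(1,4):
--         ld = ['','','','','']
--         for i in range(5):
--             ld[i] = l[i]
--         del(ld[e])
--
--         if ld == sjoi:
--             return True
--     return False
-- ===== SOURCE B (Python) =====
-- def ereaserl(l):
--     a, b, c, d, f = l[0], l[1], l[2], l[3], l[4]
--     return (a == 'S' and c == 'J' and d == 'O' and f == 'I') \
--         or (a == 'S' and b == 'J' and d == 'O' and f == 'I') \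
--         or (a == 'S' and b == 'J' and c == 'O' and f == 'I')
-- ===== Notes on version B (the rewrite author's own statement) =====
-- stated objective: simpler
-- what changed: Replaces the loop that copies the first five elements into a scratch list, deletes an index and compares against the module constant, by one closed-form boolean over the five elements accessed once up front (no loop, no list building, no del).
import Mathlib
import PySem

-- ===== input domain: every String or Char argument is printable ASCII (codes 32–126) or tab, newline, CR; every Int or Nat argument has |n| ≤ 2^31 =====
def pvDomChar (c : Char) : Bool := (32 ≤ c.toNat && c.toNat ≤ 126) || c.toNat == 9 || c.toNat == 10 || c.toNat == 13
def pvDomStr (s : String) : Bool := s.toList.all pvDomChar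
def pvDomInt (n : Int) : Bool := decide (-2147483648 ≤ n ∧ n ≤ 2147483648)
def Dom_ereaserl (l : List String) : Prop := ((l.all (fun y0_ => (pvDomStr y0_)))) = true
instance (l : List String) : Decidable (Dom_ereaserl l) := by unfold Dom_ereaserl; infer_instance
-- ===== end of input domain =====

-- B replaces A's loop (copy five elements, delete index e, compare to the constant) with one
-- closed-form boolean over the five elements accessed up front; objective: simpler.


-- ===== PORT A =====
-- l[i] (raises IndexError when out of range; excluded by Pre_), ported via pyGet? with a
-- default that Pre_ makes unreachable
def pyAGet (l : List String) (i : Int) : String := (PySem.List.pyGet? l i).getD ""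

-- transliteration of A: for e in 1..3, build ld = [l[0],…,l[4]], del ld[e], compare to sjoi;
-- early 'return True' becomes List.any over [1,2,3]
def ereaserl (l : List String) : Bool :=
  ([1, 2, 3] : List Nat).any (fun e =>
    let ld := [pyAGet l 0, pyAGet l 1, pyAGet l 2, pyAGet l 3, pyAGet l 4]
    let ld := ld.eraseIdx e
    ld == ["S", "J", "O", "I"])

-- ===== PORT B =====
def ereaserl_alt (l : List String) : Bool :=
  let a := (PySem.List.pyGet? l 0).getD ""
  let b := (PySem.List.pyGet? l 1).getD ""
  let c := (PySem.List.pyGet? l 2).getD ""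
  let d := (PySem.List.pyGet? l 3).getD ""
  let f := (PySem.List.pyGet? l 4).getD ""
  (a == "S" && c == "J" && d == "O" && f == "I") ||
  (a == "S" && b == "J" && d == "O" && f == "I") ||
  (a == "S" && b == "J" && c == "O" && f == "I")

-- ===== PRECONDITION & SPEC =====
-- A raises IndexError (l[i], i < 5) when the list has fewer than five elements; Pre_ excludes exactly those.
def Pre_ereaserl (l : List String) : Prop := 5 ≤ l.length
instance (l : List String) : Decidable (Pre_ereaserl l) := by unfold Pre_ereaserl; infer_instance
def pvWitness_ereaserl : List String := ["S", "x", "J", "O", "I"]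

def Spec_ereaserl (l : List String) (out : Bool) : Prop := out = ereaserl_alt l
instance (l : List String) (out : Bool) : Decidable (Spec_ereaserl l out) := by unfold Spec_ereaserl; infer_instance

-- ===== CLAIM (what is proved, stated in full; the proofs are below) =====
def Claim_equal_ereaserl : Prop := ∀ (l : List String), Dom_ereaserl l → Pre_ereaserl l → Spec_ereaserl l (ereaserl l)

-- ===== LEMMAS AND PROOFS =====

-- ===== VERDICT (by name: the statement is the Claim_ definition above) =====
theorem ereaserl_spec : Claim_equal_ereaserl := by
  intro l _ hpre
  unfold Pre_ereaserl at hpre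
  match l, hpre with
  | s0 :: s1 :: s2 :: s3 :: s4 :: rest, _ =>
    have h4 : (0:Int) ≤ (rest.length : Int) := Int.natCast_nonneg _
    simp [Spec_ereaserl, ereaserl, ereaserl_alt, pyAGet, PySem.List.pyGet?, PySem.List.pyIdx?,
      List.any, List.eraseIdx, Bool.and_assoc, Bool.or_assoc, show (0:Int) ≤ (rest.length:Int)+1+1+1+1 by omega,
      show (2:Int) ≤ (rest.length:Int)+1+1+1+1 by omega, show (3:Int) ≤ (rest.length:Int)+1+1+1+1 by omega,
      show (4:Int) ≤ (rest.length:Int)+1+1+1+1 by omega, show (0:Int) ≤ (rest.length:Int)+1+1+1 by omega]
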